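-- pv_equiv track=rewrite | github.com/AmiltonCabral/programacao-1 | Unidade 06/Miniteste/concatena-simetricos/solucao.py | concatena_simetricos
-- ===== SOURCE A (Python) =====
-- def concatena_simetricos(valores):
--     novos_valores = []
--     contador = len(valores) -1
--     for i in range(len(valores) // 2 ):
--         if valores[i][0] <= valores[contador][0]:
--             novos_valores.append(valores[i] + valores[contador])
--         else:
--             novos_valores.append(valores[contador] + valores[i])
--         contador -= 1
--     if len(valores) % 2 == 1:
--         novos_valores.append( valores[(len(valores) // 2)] )
--     return novos_valores
-- ===== SOURCE B (Python) =====
-- def concatena_simetricos(valores):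
--     # Divide-and-shrink over two stacks: `frente` (a reversed copy) yields the
--     # elements from the front, `tras` yields them from the back; each step pops
--     # one pair and shrinks the remaining count by 2, until at most one is left.
--     frente = valores[::-1]
--     tras = list(valores)
--     novos_valores = []
--     restantes = len(valores)
--     while restantes > 1:
--         primeiro = frente.pop()
--         ultimo = tras.pop()
--         if primeiro[0] <= ultimo[0]:
--             novos_valores.append(primeiro + ultimo)
--         else:
--             novos_valores.append(ultimo + primeiro)
--         restantes -= 2
--     if restantes:
--         novos_valores.append(frente.pop())
--     return novos_valores
-- ===== Notes on version B (the rewrite author's own statement) =====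
-- stated objective: alternative
-- what changed: Replaces A's index loop over the first half (front index i plus a back counter into the fixed list) by a divide-and-shrink worklist over two stacks: a reversed copy popped for front elements and a plain copy popped for back elements, with a remaining-count countdown instead of any indexing.
import Mathlib
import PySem

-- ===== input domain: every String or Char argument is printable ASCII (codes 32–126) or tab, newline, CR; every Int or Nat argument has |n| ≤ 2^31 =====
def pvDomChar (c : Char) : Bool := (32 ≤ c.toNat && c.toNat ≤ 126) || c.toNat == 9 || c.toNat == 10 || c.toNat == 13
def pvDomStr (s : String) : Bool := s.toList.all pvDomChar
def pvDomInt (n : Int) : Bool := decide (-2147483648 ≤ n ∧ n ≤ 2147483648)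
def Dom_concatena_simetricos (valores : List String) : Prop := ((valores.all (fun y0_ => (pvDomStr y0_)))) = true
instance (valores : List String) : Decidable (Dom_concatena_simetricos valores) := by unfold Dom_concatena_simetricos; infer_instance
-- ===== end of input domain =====

-- B replaces A's index loop (front index + back counter) by a divide-and-shrink worklist over two
-- stacks popped once per step; equivalence is about the return value (no mutation of the argument).

-- ===== PORT A =====
-- Python's `s[0]` on the (under Pre_) nonempty strings: first character; headD is exact there.
def concatena_simetricos (valores : List String) : List String :=
  let n : Int := (valores.length : Int)
  let st := (PySem.List.pyRange 0 (PySem.Int.floordiv n 2) 1).foldl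
    (fun (st : List String × Int) i =>
      let vi := PySem.List.pyGetD valores i ""
      let vc := PySem.List.pyGetD valores st.2 ""
      if vi.toList.headD ' ' ≤ vc.toList.headD ' '
      then (st.1 ++ [vi ++ vc], st.2 - 1)
      else (st.1 ++ [vc ++ vi], st.2 - 1))
    (([] : List String), n - 1)
  if PySem.Int.mod n 2 == 1
  then st.1 ++ [PySem.List.pyGetD valores (PySem.Int.floordiv n 2) ""]
  else st.1

-- ===== PORT B =====
-- Source B's while loop: pop one element from each of the two stacks until the count is ≤ 1.
def pvPeel (frente tras novos : List String) (restantes : Nat) : List String :=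
  if restantes > 1 then
    let primeiro := frente.getLastD ""          -- frente.pop()
    let frente' := frente.dropLast
    let ultimo := tras.getLastD ""              -- tras.pop()
    let tras' := tras.dropLast
    pvPeel frente' tras'
      (novos ++ [if primeiro.toList.headD ' ' ≤ ultimo.toList.headD ' '
                 then primeiro ++ ultimo else ultimo ++ primeiro])
      (restantes - 2)
  else if restantes = 1 then novos ++ [frente.getLastD ""] else novos
termination_by restantes

def concatena_simetricos_alt (valores : List String) : List String :=
  pvPeel valores.reverse valores [] valores.length

-- ===== PRECONDITION & SPEC =====
-- Pre_ excludes exactly the inputs on which Python A raises IndexError: a list some of whose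
-- paired elements (every position except the middle one of an odd-length list) is the empty string.
def Pre_concatena_simetricos (valores : List String) : Prop :=
  ∀ i ∈ List.range valores.length,
    valores.getD i "" ≠ "" ∨ (valores.length % 2 = 1 ∧ i = valores.length / 2)
instance (valores : List String) : Decidable (Pre_concatena_simetricos valores) := by
  unfold Pre_concatena_simetricos; infer_instance

def pvWitness_concatena_simetricos : List String := ["ba", "c", "ab"]

def Spec_concatena_simetricos (valores : List String) (out : List String) : Prop := out = concatena_simetricos_alt valores
instance (valores : List String) (out : List String) : Decidable (Spec_concatena_simetricos valores out) := by unfold Spec_concatena_simetricos; infer_instance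

-- ===== CLAIM (what is proved, stated in full; the proofs are below) =====
def Claim_equal_concatena_simetricos : Prop := ∀ (valores : List String), Dom_concatena_simetricos valores → Pre_concatena_simetricos valores → Spec_concatena_simetricos valores (concatena_simetricos valores)

-- ===== LEMMAS AND PROOFS =====

-- the ordered concatenation both programs build from a front element and a back element
def pvPair (x y : String) : String :=
  if x.toList.headD ' ' ≤ y.toList.headD ' ' then x ++ y else y ++ x

-- the concatenated pair A builds from positions i and c
def pvPairAt (valores : List String) (i c : Int) : String :=
  pvPair (PySem.List.pyGetD valores i "") (PySem.List.pyGetD valores c "")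

-- A's result in closed form: pairs of the first half with mirrors, plus the optional middle
def pvAform (l : List String) : List String :=
  (List.range (l.length / 2)).map
    (fun (i : Nat) => pvPairAt l (i : Int) ((l.length : Int) - 1 - (i : Int)))
  ++ (if l.length % 2 = 1 then [PySem.List.pyGetD l ((l.length / 2 : Nat) : Int) ""] else [])

-- A's loop as a map over the first half of the indices
theorem pvFoldA (valores : List String) (k : Nat) (c : Int) (nv : List String) :
    (PySem.List.pyRange 0 (k : Int) 1).foldl
      (fun (st : List String × Int) i =>
        let vi := PySem.List.pyGetD valores i ""
        let vc := PySem.List.pyGetD valores st.2 ""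
        if vi.toList.headD ' ' ≤ vc.toList.headD ' '
        then (st.1 ++ [vi ++ vc], st.2 - 1)
        else (st.1 ++ [vc ++ vi], st.2 - 1))
      (nv, c)
    = (nv ++ (List.range k).map (fun (i : Nat) => pvPairAt valores (i : Int) (c - (i : Int))), c - k) := by
  induction k with
  | zero => simp [PySem.List.pyRange_one_eq_nil]
  | succ k ih =>
    have h1 : ((k : Int) + 1) = ((k + 1 : Nat) : Int) := by push_cast; ring
    rw [← h1, PySem.List.pyRange_one_succ_right (by positivity), List.foldl_append, ih,
      List.range_succ, List.foldl_cons, List.foldl_nil]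
    have h2 : c - (k : Int) - 1 = c - ((k + 1 : Nat) : Int) := by push_cast; ring
    by_cases h : (PySem.List.pyGetD valores ((k : Nat) : Int) "").toList.headD ' '
        ≤ (PySem.List.pyGetD valores (c - ((k : Nat) : Int)) "").toList.headD ' '
    · simp only [pvPairAt, pvPair, if_pos h, List.map_append, List.map_cons, List.map_nil,
        List.append_assoc, Prod.mk.injEq]
      exact ⟨trivial, by ring⟩
    · simp only [pvPairAt, pvPair, if_neg h, List.map_append, List.map_cons, List.map_nil,
        List.append_assoc, Prod.mk.injEq]
      exact ⟨trivial, by ring⟩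

-- A's whole result is the closed form
theorem pvAeq (valores : List String) : concatena_simetricos valores = pvAform valores := by
  simp only [concatena_simetricos, pvAform]
  have hfd : PySem.Int.floordiv (valores.length : Int) 2 = ((valores.length / 2 : Nat) : Int) := by
    exact_mod_cast PySem.Int.floordiv_natCast valores.length 2
  have hmd : PySem.Int.mod (valores.length : Int) 2 = ((valores.length % 2 : Nat) : Int) := by
    exact_mod_cast PySem.Int.mod_natCast valores.length 2
  rw [hfd]
  rw [pvFoldA valores (valores.length / 2) ((valores.length : Int) - 1) []]
  simp only [List.nil_append, hmd]
  by_cases h : valores.length % 2 = 1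
  · simp [h]
  · simp [h]
    omega

-- peeling the outer pair off the closed form
theorem pvAform_peel (a z : String) (mid : List String) :
    pvAform (a :: (mid ++ [z])) = pvPair a z :: pvAform mid := by
  have hlen : (a :: (mid ++ [z])).length = mid.length + 2 := by simp
  have gcast : ∀ (l : List String) (k : Nat), PySem.List.pyGetD l (k : Int) "" = l.getD k "" := by
    intro l k
    rw [PySem.List.pyGetD_natCast]
  have gmidz : ∀ k : Nat, k < mid.length → (mid ++ [z]).getD k "" = mid.getD k "" := by
    intro k hk
    simp [List.getD_eq_getElem?_getD, List.getElem?_append_left hk]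
  have hdiv : (mid.length + 2) / 2 = mid.length / 2 + 1 := by omega
  have hmod : (mid.length + 2) % 2 = mid.length % 2 := by omega
  unfold pvAform
  simp only [hlen, hdiv, hmod]
  rw [List.range_succ_eq_map, List.map_cons, List.map_map, List.cons_append]
  congr 1
  · -- head pair
    unfold pvPairAt
    have h1 : ((mid.length + 2 : Nat) : Int) - 1 - ((0 : Nat) : Int) = ((mid.length + 1 : Nat) : Int) := by
      push_cast; ring
    rw [h1, gcast, gcast]
    have e0 : (a :: (mid ++ [z])).getD 0 "" = a := rfl
    have ez : (a :: (mid ++ [z])).getD (mid.length + 1) "" = z := by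
      simp [List.getD_eq_getElem?_getD]
    rw [e0, ez]
  congr 1
  · -- mapped tail pairs
    apply List.map_congr_left
    intro i hi
    have him : i < mid.length / 2 := by simpa using hi
    have hlt : i < mid.length := lt_of_lt_of_le him (Nat.div_le_self _ _)
    have hm1 : 1 ≤ mid.length := by omega
    simp only [Function.comp, Nat.succ_eq_add_one]
    unfold pvPairAt
    have h1 : ((mid.length + 2 : Nat) : Int) - 1 - ((i + 1 : Nat) : Int) = ((mid.length - i : Nat) : Int) := by
      push_cast [Nat.cast_sub (by omega : i ≤ mid.length)]; ring
    have h2 : ((mid.length : Nat) : Int) - 1 - ((i : Nat) : Int) = ((mid.length - 1 - i : Nat) : Int) := by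
      push_cast [Nat.cast_sub (by omega : 1 + i ≤ mid.length), Nat.sub_sub]; omega
    rw [h1, h2, gcast, gcast, gcast, gcast]
    have e1 : (a :: (mid ++ [z])).getD (i + 1) "" = mid.getD i "" := by
      show (mid ++ [z]).getD i "" = mid.getD i ""
      exact gmidz i hlt
    have hsub : mid.length - i = (mid.length - 1 - i) + 1 := by omega
    have e2 : (a :: (mid ++ [z])).getD (mid.length - i) "" = mid.getD (mid.length - 1 - i) "" := by
      rw [hsub]
      show (mid ++ [z]).getD (mid.length - 1 - i) "" = mid.getD (mid.length - 1 - i) ""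
      exact gmidz _ (by omega)
    rw [e1, e2]
  · -- middle element
    by_cases hp : mid.length % 2 = 1
    · rw [if_pos hp, if_pos hp, gcast, gcast]
      have hm1 : mid.length / 2 < mid.length := by omega
      have : (a :: (mid ++ [z])).getD (mid.length / 2 + 1) "" = mid.getD (mid.length / 2) "" := by
        show (mid ++ [z]).getD (mid.length / 2) "" = mid.getD (mid.length / 2) ""
        exact gmidz _ hm1
      rw [this]
    · rw [if_neg hp, if_neg hp]

-- Source B's loop accumulates exactly the closed form: the tops of the two stacks walk the
-- remaining middle segment `seg` from its two ends; material below the tops is never touched.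
theorem pvPeel_eq : ∀ (n : Nat) (seg j1 j2 out : List String), seg.length = n →
    pvPeel (j1 ++ seg.reverse) (j2 ++ seg) out n = out ++ pvAform seg := by
  intro n
  induction n using Nat.strong_induction_on with
  | _ n ih =>
    intro seg j1 j2 out hl
    match seg with
    | [] =>
      subst hl
      rw [pvPeel]
      simp [pvAform]
    | [x] =>
      subst hl
      rw [pvPeel]
      simp [pvAform]
    | a :: b :: t =>
      have hne : (b :: t) ≠ ([] : List String) := by simp
      have hdec : (b :: t).dropLast ++ [(b :: t).getLast hne] = b :: t :=
        List.dropLast_concat_getLast hne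
      set z := (b :: t).getLast hne with hz
      set mid := (b :: t).dropLast with hmid
      have hre : a :: b :: t = a :: (mid ++ [z]) := by rw [hdec]
      have hn : n = mid.length + 2 := by
        simp at hl
        simp [hmid, List.length_dropLast]
        omega
      have hf : j1 ++ (a :: b :: t).reverse = ((j1 ++ (mid ++ [z]).reverse) ++ [a]) := by
        rw [hre, List.reverse_cons, List.append_assoc]
      have hfr : (mid ++ [z]).reverse = (z :: mid.reverse) := by
        rw [List.reverse_append]; rfl
      have ht : j2 ++ (a :: b :: t) = (((j2 ++ [a]) ++ mid) ++ [z]) := by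
        rw [hre]; simp
      rw [pvPeel, if_pos (by omega : n > 1), hf, ht]
      simp only [List.getLastD_concat, List.dropLast_concat]
      rw [hfr]
      have hf2 : j1 ++ z :: mid.reverse = (j1 ++ [z]) ++ mid.reverse := by simp
      rw [hf2, ih (n - 2) (by omega) mid (j1 ++ [z]) (j2 ++ [a]) _ (by omega)]
      rw [List.append_assoc]
      congr 1
      rw [hre, pvAform_peel]
      simp [pvPair]

theorem pvAB (l : List String) : concatena_simetricos l = concatena_simetricos_alt l := by
  have h := pvPeel_eq l.length l [] [] [] rfl
  simp only [List.nil_append] at h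
  rw [pvAeq, concatena_simetricos_alt, h]

-- ===== VERDICT (by name: the statement is the Claim_ definition above) =====
theorem concatena_simetricos_spec : Claim_equal_concatena_simetricos := by
  intro valores _ _
  unfold Spec_concatena_simetricos
  exact pvAB valores
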